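-- pv_equiv track=rewrite | github.com/agorala-b/OurWeb | scripts/bib2yaml.py | clean_bibtex_string
-- ===== SOURCE A (Python) =====
-- LATEX_UNICODE_MAP = {
--     r"{\'a}": "á", r"{\`a}": "à", r"{\^a}": "â", r"{\~a}": "ã", r"{\.a}": "ȧ",
--     r"{\'e}": "é", r"{\`e}": "è", r"{\^e}": "ê", r"{\~e}": "ẽ",
--     r"{\'i}": "í", r"{\`i}": "ì", r"{\^i}": "î", r"{\~i}": "ĩ",
--     r"{\'o}": "ó", r"{\`o}": "ò", r"{\^o}": "ô", r"{\~o}": "õ", r"{\"o}": "ö",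
--     r"{\'u}": "ú", r"{\`u}": "ù", r"{\^u}": "û", r"{\~u}": "ũ", r"{\"u}": "ü",
--     r"{\'y}": "ý", r"{\`y}": "ỳ", r"{\^y}": "ŷ", r"{\~y}": "ỹ",
--     # Viết hoa
--     r"{\'A}": "Á", r"{\`A}": "À", r"{\^A}": "Â", r"{\~A}": "Ã",
--     r"{\'E}": "É", r"{\`E}": "È", r"{\^E}": "Ê", r"{\~E}": "Ẽ",
--     r"{\'I}": "Í", r"{\`I}": "Ì", r"{\^I}": "Î", r"{\~I}": "Ĩ",
--     r"{\'O}": "Ó", r"{\`O}": "Ò", r"{\^O}": "Ô", r"{\~O}": "Õ", r"{\"O}": "Ö",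
--     r"{\'U}": "Ú", r"{\`U}": "Ù", r"{\^U}": "Û", r"{\~U}": "Ũ", r"{\"U}": "Ü",
--     r"{\'Y}": "Ý", r"{\`Y}": "Ỳ", r"{\^Y}": "Ŷ", r"{\~Y}": "Ỹ",
--     # Các ký tự Việt Nam phổ biến khác (nếu có d/đ)
--     r"{\dj}": "đ", r"{\DH}": "Đ"
-- }
--
-- def clean_bibtex_string(text):
--     """Làm sạch chuỗi BibTeX: xoá ngoặc {}, escape ký tự LaTeX sang Unicode"""
--     if not text:
--         return ""
--
--     # 1. Thay thế các escape LaTeX bằng ký tự Unicode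
--     for latex, unicode_char in LATEX_UNICODE_MAP.items():
--         text = text.replace(latex, unicode_char)
--         # Handle trường hợp không có ngoặc, vd: \'a -> á
--         text = text.replace(latex.replace("{", "").replace("}", ""), unicode_char)
--
--     # 2. Xoá các dấu ngoặc {} còn sót lại (dùng cho capitalize escape trong bibtex)
--     text = text.replace("{", "").replace("}", "")
--
--     # 3. Dọn dẹp khoảng trắng thừa
--     text = " ".join(text.split())
--     return text.strip()
-- ===== SOURCE B (Python) =====
-- # Compositional single pass: the LaTeX escapes are (accent, letter) pairs, so B
-- # derives one 2-char-key lookup table from six accent rows and scans the string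
-- # once, consuming "\xy" combos and dropping loose braces on the fly.
-- _ACCENT_ROWS = [
--     ("'", "aeiouyAEIOUY", "áéíóúýÁÉÍÓÚÝ"),
--     ("`", "aeiouyAEIOUY", "àèìòùỳÀÈÌÒÙỲ"),
--     ("^", "aeiouyAEIOUY", "âêîôûŷÂÊÎÔÛŶ"),
--     ("~", "aeiouyAEIOUY", "ãẽĩõũỹÃẼĨÕŨỸ"),
--     ('"', "oOuU", "öÖüÜ"),
--     (".", "a", "ȧ"),
-- ]
-- _COMBOS = {acc + l: u for acc, letters, repls in _ACCENT_ROWS for l, u in zip(letters, repls)}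
-- _COMBOS["dj"] = "đ"
-- _COMBOS["DH"] = "Đ"
--
--
-- def clean_bibtex_string(text):
--     """Làm sạch chuỗi BibTeX: xoá ngoặc {}, escape ký tự LaTeX sang Unicode"""
--     if not text:
--         return ""
--     out = []
--     i, n = 0, len(text)
--     while i < n:
--         ch = text[i]
--         if ch == "\\" and i + 2 < n:
--             u = _COMBOS.get(text[i + 1:i + 3])
--             if u is not None:
--                 out.append(u)
--                 i += 3
--                 continue
--         if ch != "{" and ch != "}":
--             out.append(ch)
--         i += 1
--     return " ".join("".join(out).split())
-- ===== Notes on version B (the rewrite author's own statement) =====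
-- stated objective: alternative
-- what changed: A rewrites the whole string ~106 times (two str.replace passes per hard-coded map entry, then two brace-removal passes); B instead derives one lookup table compositionally from six accent rows (accent mark x base letters) keyed by the 2-char escape body, and makes a single left-to-right scan that consumes a backslash-escape on a table hit, drops loose braces on the fly and copies everything else, followed by the same whitespace normalisation; the scan is one O(n) pass but, being a Python-level loop, it is not measured faster than A's C-level replace passes.
import Mathlib
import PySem

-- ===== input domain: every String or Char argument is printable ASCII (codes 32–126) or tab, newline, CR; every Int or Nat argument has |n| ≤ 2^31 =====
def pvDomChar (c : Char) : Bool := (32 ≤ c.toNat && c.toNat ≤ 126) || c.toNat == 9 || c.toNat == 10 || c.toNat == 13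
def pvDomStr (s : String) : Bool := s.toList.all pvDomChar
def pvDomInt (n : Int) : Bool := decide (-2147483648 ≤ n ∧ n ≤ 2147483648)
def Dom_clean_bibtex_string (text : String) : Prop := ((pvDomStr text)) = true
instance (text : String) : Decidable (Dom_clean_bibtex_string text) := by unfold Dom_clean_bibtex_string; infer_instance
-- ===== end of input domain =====

-- B replaces A's ~106 sequential str.replace passes by one left-to-right scan with a
-- single 2-char-key lookup table derived compositionally from six accent rows
-- (accent mark × base letter), dropping loose braces on the fly; the whitespace
-- normalisation is unchanged.

-- ===== PORT A =====

def latexMap : List (String × String) := [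
  ("{\\'a}","á"), ("{\\`a}","à"), ("{\\^a}","â"), ("{\\~a}","ã"), ("{\\.a}","ȧ"),
  ("{\\'e}","é"), ("{\\`e}","è"), ("{\\^e}","ê"), ("{\\~e}","ẽ"),
  ("{\\'i}","í"), ("{\\`i}","ì"), ("{\\^i}","î"), ("{\\~i}","ĩ"),
  ("{\\'o}","ó"), ("{\\`o}","ò"), ("{\\^o}","ô"), ("{\\~o}","õ"), ("{\\\"o}","ö"),
  ("{\\'u}","ú"), ("{\\`u}","ù"), ("{\\^u}","û"), ("{\\~u}","ũ"), ("{\\\"u}","ü"),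
  ("{\\'y}","ý"), ("{\\`y}","ỳ"), ("{\\^y}","ŷ"), ("{\\~y}","ỹ"),
  ("{\\'A}","Á"), ("{\\`A}","À"), ("{\\^A}","Â"), ("{\\~A}","Ã"),
  ("{\\'E}","É"), ("{\\`E}","È"), ("{\\^E}","Ê"), ("{\\~E}","Ẽ"),
  ("{\\'I}","Í"), ("{\\`I}","Ì"), ("{\\^I}","Î"), ("{\\~I}","Ĩ"),
  ("{\\'O}","Ó"), ("{\\`O}","Ò"), ("{\\^O}","Ô"), ("{\\~O}","Õ"), ("{\\\"O}","Ö"),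
  ("{\\'U}","Ú"), ("{\\`U}","Ù"), ("{\\^U}","Û"), ("{\\~U}","Ũ"), ("{\\\"U}","Ü"),
  ("{\\'Y}","Ý"), ("{\\`Y}","Ỳ"), ("{\\^Y}","Ŷ"), ("{\\~Y}","Ỹ"),
  ("{\\dj}","đ"), ("{\\DH}","Đ")]

def clean_bibtex_string (text : String) : String :=
  if text = "" then ""
  else
    PySem.Str.strip (PySem.Str.join " " (PySem.Str.split₀
      (PySem.Str.replace (PySem.Str.replace
        (latexMap.foldl (fun t lu =>
          PySem.Str.replace (PySem.Str.replace t lu.1 lu.2)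
            (PySem.Str.replace (PySem.Str.replace lu.1 "{" "") "}" "") lu.2) text)
        "{" "") "}" "")))

-- ===== PORT B =====

-- _ACCENT_ROWS: (accent mark, base letters, accented replacements)
def accentRows : List (String × String × String) := [
  ("'", "aeiouyAEIOUY", "áéíóúýÁÉÍÓÚÝ"),
  ("`", "aeiouyAEIOUY", "àèìòùỳÀÈÌÒÙỲ"),
  ("^", "aeiouyAEIOUY", "âêîôûŷÂÊÎÔÛŶ"),
  ("~", "aeiouyAEIOUY", "ãẽĩõũỹÃẼĨÕŨỸ"),
  ("\"", "oOuU", "öÖüÜ"),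
  (".", "a", "ȧ")]

-- _COMBOS = {acc + l: u for acc, letters, repls in _ACCENT_ROWS for l, u in zip(letters, repls)}
-- _COMBOS["dj"] = "đ"; _COMBOS["DH"] = "Đ"
def comboTbl : PySem.Dict (List Char) (List Char) :=
  PySem.Dict.insert (PySem.Dict.insert
    (PySem.Dict.mk (accentRows.flatMap (fun r =>
      (List.zip r.2.1.toList r.2.2.toList).map (fun lu => (r.1.toList ++ [lu.1], [lu.2])))))
    ['d', 'j'] ['đ']) ['D', 'H'] ['Đ']

-- the while loop of B: on a backslash with two lookahead chars try the combo table
-- (consume 3 chars on a hit), otherwise copy the char unless it is a loose brace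
def scanB : List Char → List Char
  | [] => []
  | c :: rest =>
    match (if c = '\\' ∧ 2 ≤ rest.length then PySem.Dict.get? comboTbl (List.take 2 rest) else none) with
    | some u => u ++ scanB (List.drop 2 rest)
    | none => if c ≠ '{' ∧ c ≠ '}' then c :: scanB rest else scanB rest
termination_by t => t.length
decreasing_by all_goals simp

def clean_bibtex_string_alt (text : String) : String :=
  if text = "" then ""
  else PySem.Str.join " " (PySem.Str.split₀ (String.ofList (scanB text.toList)))

-- ===== PRECONDITION & SPEC =====
def Spec_clean_bibtex_string (text : String) (out : String) : Prop := out = clean_bibtex_string_alt text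
instance (text : String) (out : String) : Decidable (Spec_clean_bibtex_string text out) := by unfold Spec_clean_bibtex_string; infer_instance

-- ===== CLAIM (what is proved, stated in full; the proofs are below) =====
def Claim_equal_clean_bibtex_string : Prop := ∀ (text : String), Dom_clean_bibtex_string text → Spec_clean_bibtex_string text (clean_bibtex_string text)

-- ===== LEMMAS AND PROOFS =====

-- A's keys with the braces removed (what  latex.replace("{","").replace("}","")  computes)
def stripA (p : List Char) : List Char :=
  PySem.Chars.replace (PySem.Chars.replace p ['{'] []) ['}'] []

-- the 104 (pattern, replacement) pairs in exactly A's replacement order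
def PL : List (List Char × List Char) :=
  latexMap.flatMap (fun lu => [(lu.1.toList, lu.2.toList), (stripA lu.1.toList, lu.2.toList)])

def PLlit : List (List Char × List Char) := [
  (['{','\\','\'','a','}'], ['á']),
  (['\\','\'','a'], ['á']),
  (['{','\\','`','a','}'], ['à']),
  (['\\','`','a'], ['à']),
  (['{','\\','^','a','}'], ['â']),
  (['\\','^','a'], ['â']),
  (['{','\\','~','a','}'], ['ã']),
  (['\\','~','a'], ['ã']),
  (['{','\\','.','a','}'], ['ȧ']),
  (['\\','.','a'], ['ȧ']),
  (['{','\\','\'','e','}'], ['é']),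
  (['\\','\'','e'], ['é']),
  (['{','\\','`','e','}'], ['è']),
  (['\\','`','e'], ['è']),
  (['{','\\','^','e','}'], ['ê']),
  (['\\','^','e'], ['ê']),
  (['{','\\','~','e','}'], ['ẽ']),
  (['\\','~','e'], ['ẽ']),
  (['{','\\','\'','i','}'], ['í']),
  (['\\','\'','i'], ['í']),
  (['{','\\','`','i','}'], ['ì']),
  (['\\','`','i'], ['ì']),
  (['{','\\','^','i','}'], ['î']),
  (['\\','^','i'], ['î']),
  (['{','\\','~','i','}'], ['ĩ']),
  (['\\','~','i'], ['ĩ']),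
  (['{','\\','\'','o','}'], ['ó']),
  (['\\','\'','o'], ['ó']),
  (['{','\\','`','o','}'], ['ò']),
  (['\\','`','o'], ['ò']),
  (['{','\\','^','o','}'], ['ô']),
  (['\\','^','o'], ['ô']),
  (['{','\\','~','o','}'], ['õ']),
  (['\\','~','o'], ['õ']),
  (['{','\\','\"','o','}'], ['ö']),
  (['\\','\"','o'], ['ö']),
  (['{','\\','\'','u','}'], ['ú']),
  (['\\','\'','u'], ['ú']),
  (['{','\\','`','u','}'], ['ù']),
  (['\\','`','u'], ['ù']),
  (['{','\\','^','u','}'], ['û']),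
  (['\\','^','u'], ['û']),
  (['{','\\','~','u','}'], ['ũ']),
  (['\\','~','u'], ['ũ']),
  (['{','\\','\"','u','}'], ['ü']),
  (['\\','\"','u'], ['ü']),
  (['{','\\','\'','y','}'], ['ý']),
  (['\\','\'','y'], ['ý']),
  (['{','\\','`','y','}'], ['ỳ']),
  (['\\','`','y'], ['ỳ']),
  (['{','\\','^','y','}'], ['ŷ']),
  (['\\','^','y'], ['ŷ']),
  (['{','\\','~','y','}'], ['ỹ']),
  (['\\','~','y'], ['ỹ']),
  (['{','\\','\'','A','}'], ['Á']),
  (['\\','\'','A'], ['Á']),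
  (['{','\\','`','A','}'], ['À']),
  (['\\','`','A'], ['À']),
  (['{','\\','^','A','}'], ['Â']),
  (['\\','^','A'], ['Â']),
  (['{','\\','~','A','}'], ['Ã']),
  (['\\','~','A'], ['Ã']),
  (['{','\\','\'','E','}'], ['É']),
  (['\\','\'','E'], ['É']),
  (['{','\\','`','E','}'], ['È']),
  (['\\','`','E'], ['È']),
  (['{','\\','^','E','}'], ['Ê']),
  (['\\','^','E'], ['Ê']),
  (['{','\\','~','E','}'], ['Ẽ']),
  (['\\','~','E'], ['Ẽ']),
  (['{','\\','\'','I','}'], ['Í']),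
  (['\\','\'','I'], ['Í']),
  (['{','\\','`','I','}'], ['Ì']),
  (['\\','`','I'], ['Ì']),
  (['{','\\','^','I','}'], ['Î']),
  (['\\','^','I'], ['Î']),
  (['{','\\','~','I','}'], ['Ĩ']),
  (['\\','~','I'], ['Ĩ']),
  (['{','\\','\'','O','}'], ['Ó']),
  (['\\','\'','O'], ['Ó']),
  (['{','\\','`','O','}'], ['Ò']),
  (['\\','`','O'], ['Ò']),
  (['{','\\','^','O','}'], ['Ô']),
  (['\\','^','O'], ['Ô']),
  (['{','\\','~','O','}'], ['Õ']),
  (['\\','~','O'], ['Õ']),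
  (['{','\\','\"','O','}'], ['Ö']),
  (['\\','\"','O'], ['Ö']),
  (['{','\\','\'','U','}'], ['Ú']),
  (['\\','\'','U'], ['Ú']),
  (['{','\\','`','U','}'], ['Ù']),
  (['\\','`','U'], ['Ù']),
  (['{','\\','^','U','}'], ['Û']),
  (['\\','^','U'], ['Û']),
  (['{','\\','~','U','}'], ['Ũ']),
  (['\\','~','U'], ['Ũ']),
  (['{','\\','\"','U','}'], ['Ü']),
  (['\\','\"','U'], ['Ü']),
  (['{','\\','\'','Y','}'], ['Ý']),
  (['\\','\'','Y'], ['Ý']),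
  (['{','\\','`','Y','}'], ['Ỳ']),
  (['\\','`','Y'], ['Ỳ']),
  (['{','\\','^','Y','}'], ['Ŷ']),
  (['\\','^','Y'], ['Ŷ']),
  (['{','\\','~','Y','}'], ['Ỹ']),
  (['\\','~','Y'], ['Ỹ']),
  (['{','\\','d','j','}'], ['đ']),
  (['\\','d','j'], ['đ']),
  (['{','\\','D','H','}'], ['Đ']),
  (['\\','D','H'], ['Đ'])]

-- a structural-recursion rendering of Python str.replace (leftmost, non-overlapping)
def rep (old nw : List Char) : List Char → List Char
  | [] => []
  | c :: t =>
    if old.isPrefixOf (c :: t) then nw ++ rep old nw (t.drop (old.length - 1))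
    else c :: rep old nw t
termination_by t => t.length
decreasing_by all_goals simp

def pcMatch (t : List Char) (pc : List Char × List Char) : Bool :=
  !pc.1.isEmpty && pc.1.isPrefixOf t

-- multi-pattern single pass: at each position replace the first listed matching pattern
def scanL (L : List (List Char × List Char)) : List Char → List Char
  | [] => []
  | c :: rest =>
    match L.find? (pcMatch (c :: rest)) with
    | some pc => pc.2 ++ scanL L (rest.drop (pc.1.length - 1))
    | none => c :: scanL L rest
termination_by t => t.length
decreasing_by all_goals simp

def braceFilter (s : List Char) : List Char := s.filter (fun c => !(c == '{' || c == '}'))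

-- separation: no occurrence of p can start inside q (for any continuation of q)
def pvSep (p q : List Char) : Prop :=
  ∀ k, k < q.length → ¬ p <+: q.drop k ∧ ¬ q.drop k <+: p

def npre (a b : List Char × List Char) : Prop := ¬ a.1 <+: b.1 ∧ ¬ b.1 <+: a.1

def pvGL (L : List (List Char × List Char)) : Prop :=
  (∀ pc ∈ L, pc.1 ≠ [] ∧ pc.2 ≠ []) ∧
  L.Pairwise (fun a b => pvSep a.1 b.1) ∧
  (∀ pc ∈ L, ∀ qc ∈ L, ∀ ch ∈ qc.1, ch ∉ pc.2)

-- Bool versions of the pattern-table side conditions, checked by kernel evaluation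
def sepB (p q : List Char) : Bool :=
  (List.range q.length).all (fun k => !(p.isPrefixOf (q.drop k)) && !((q.drop k).isPrefixOf p))

def pairwiseSepB : List (List Char × List Char) → Bool
  | [] => true
  | a :: l => l.all (fun b => sepB a.1 b.1) && pairwiseSepB l

def glB (L : List (List Char × List Char)) : Bool :=
  L.all (fun pc => !pc.1.isEmpty && !pc.2.isEmpty) && pairwiseSepB L &&
  L.all (fun pc => L.all (fun qc => qc.1.all (fun ch => !pc.2.contains ch)))

set_option maxHeartbeats 2000000 in
set_option maxRecDepth 8000 in
theorem PL_eq : PL = PLlit := by decide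

set_option maxHeartbeats 4000000 in
set_option maxRecDepth 8000 in
theorem glB_PL : glB PLlit = true := by decide

-- every combo-table entry is a 2-char key whose '\'-prefixed form is a PLlit pattern
set_option maxHeartbeats 4000000 in
set_option maxRecDepth 8000 in
theorem comboB :
    (comboTbl.items.all (fun e =>
      e.1.length == 2 && PLlit.contains (('\\' :: e.1, e.2)))) = true := by decide

-- every PLlit pattern is either a bare escape '\xy' whose tail is a combo key, or a
-- braced escape '{\xy}' whose core is again a PLlit pattern with the same value
set_option maxHeartbeats 4000000 in
set_option maxRecDepth 8000 in
theorem shapeB :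
    (PLlit.all (fun pc =>
      (pc.1.length == 3 && pc.1 == '\\' :: List.take 2 (pc.1.drop 1)
        && comboTbl.items.contains ((pc.1.drop 1, pc.2)))
   || (pc.1.length == 5 && pc.1 == '{' :: (List.take 3 (pc.1.drop 1)) ++ ['}']
        && PLlit.contains ((List.take 3 (pc.1.drop 1), pc.2))))) = true := by decide

set_option maxHeartbeats 4000000 in
set_option maxRecDepth 8000 in
theorem factsB :
    ((PLlit.all (fun pc => pc.2.all (fun ch => !(ch == '{' || ch == '}'))))
  && (latexMap.all (fun lu => !lu.1.toList.isEmpty && !(stripA lu.1.toList).isEmpty))) = true := by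
  decide

-- ---- rep: equations and basic facts ----

theorem rep_nil (old nw : List Char) : rep old nw [] = [] := by simp [rep]

theorem rep_cons_pos {old : List Char} (nw : List Char) {c : Char} {t : List Char}
    (h : old.isPrefixOf (c :: t)) :
    rep old nw (c :: t) = nw ++ rep old nw (t.drop (old.length - 1)) := by
  rw [rep]; simp [h]

theorem rep_cons_neg {old : List Char} (nw : List Char) {c : Char} {t : List Char}
    (h : ¬ old.isPrefixOf (c :: t)) :
    rep old nw (c :: t) = c :: rep old nw t := by
  rw [rep]; simp [h]

theorem go_eq (old nw : List Char) (hold : old ≠ []) :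
    ∀ fuel (l acc : List Char), l.length ≤ fuel →
      PySem.Chars.replace.go old nw fuel l acc = acc.reverse ++ rep old nw l := by
  intro fuel
  induction fuel with
  | zero =>
    intro l acc hl
    have : l = [] := by cases l <;> simp_all
    subst this
    simp [PySem.Chars.replace.go, rep_nil]
  | succ n ih =>
    intro l acc hl
    cases l with
    | nil => simp [PySem.Chars.replace.go, rep_nil]
    | cons c t =>
      rw [PySem.Chars.replace.go]
      by_cases hp : old.isPrefixOf (c :: t)
      · have hlen : 1 ≤ old.length := by
          cases old with
          | nil => exact absurd rfl hold
          | cons _ _ => simp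
        have hdrop : List.drop old.length (c :: t) = t.drop (old.length - 1) := by
          obtain ⟨m, hm⟩ : ∃ m, old.length = m + 1 :=
            ⟨old.length - 1, by omega⟩
          rw [hm]; simp [List.drop_succ_cons]
        rw [if_pos hp, hdrop]
        rw [ih (t.drop (old.length - 1)) (nw.reverse ++ acc)
            (by simp only [List.length_drop]; simp only [List.length_cons] at hl; omega)]
        rw [rep_cons_pos nw hp]
        simp
      · rw [if_neg hp]
        rw [ih t (c :: acc) (by simpa using Nat.le_of_succ_le_succ (by simpa using hl))]
        rw [rep_cons_neg nw hp]
        simp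

theorem replace_eq_rep {old : List Char} (nw : List Char) (h : old ≠ []) (s : List Char) :
    PySem.Chars.replace s old nw = rep old nw s := by
  unfold PySem.Chars.replace
  rw [if_neg (by simp [h])]
  simpa using go_eq old nw h s.length s [] le_rfl

theorem rep_single_filter (b : Char) (s : List Char) :
    rep [b] [] s = s.filter (fun c => !(c == b)) := by
  induction s with
  | nil => simp [rep_nil]
  | cons c t ih =>
    by_cases hc : b = c
    · subst hc
      rw [rep_cons_pos [] (by simp [List.isPrefixOf])]
      simpa using ih
    · rw [rep_cons_neg [] (by simp [List.isPrefixOf, hc])]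
      simp [Ne.symm hc, ih]

-- ---- prefix helpers ----

theorem prefix_append_cases {p x w : List Char} (h : p <+: x ++ w) : p <+: x ∨ x <+: p :=
  List.prefix_or_prefix_of_prefix h (List.prefix_append x w)

theorem sep_no_prefix_append {p q : List Char} (hs : pvSep p q) :
    ∀ w k, k < q.length → ¬ p <+: (q.drop k ++ w) := by
  intro w k hk hcon
  rcases prefix_append_cases hcon with h | h
  · exact (hs k hk).1 h
  · exact (hs k hk).2 h

theorem rep_append {p u q w : List Char}
    (H : ∀ k, k < q.length → ¬ p <+: (q.drop k ++ w)) :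
    rep p u (q ++ w) = q ++ rep p u w := by
  induction q with
  | nil => simp
  | cons b q' ih =>
    have h0 : ¬ p.isPrefixOf (b :: (q' ++ w)) := by
      have := H 0 (by simp)
      simpa [List.isPrefixOf_iff_prefix] using this
    rw [List.cons_append, rep_cons_neg u h0]
    rw [ih (fun k hk => by simpa [List.drop_succ_cons] using H (k + 1) (by simp; omega))]
    simp

theorem prefix_rep {p u : List Char} (hu : u ≠ []) :
    ∀ n (s q : List Char), s.length ≤ n → (∀ ch ∈ q, ch ∉ u) → q <+: rep p u s → q <+: s := by
  intro n
  induction n with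
  | zero =>
    intro s q hs hd hpre
    have : s = [] := by cases s <;> simp_all
    subst this
    rw [rep_nil] at hpre
    simpa [List.prefix_nil] using hpre
  | succ n ih =>
    intro s q hs hd hpre
    cases s with
    | nil =>
      rw [rep_nil] at hpre
      simpa [List.prefix_nil] using hpre
    | cons c t =>
      by_cases hp : p.isPrefixOf (c :: t)
      · rw [rep_cons_pos u hp] at hpre
        cases q with
        | nil => exact List.nil_prefix
        | cons e q' =>
          cases u with
          | nil => exact absurd rfl hu
          | cons d u' =>
            rw [List.cons_append] at hpre
            rcases (List.cons_prefix_cons.mp hpre) with ⟨heq, -⟩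
            exact absurd (heq ▸ List.mem_cons_self) (hd e List.mem_cons_self)
      · rw [rep_cons_neg u hp] at hpre
        cases q with
        | nil => exact List.nil_prefix
        | cons e q' =>
          rcases (List.cons_prefix_cons.mp hpre) with ⟨rfl, hq'⟩
          have : q' <+: t :=
            ih t q' (by simpa using Nat.le_of_succ_le_succ (by simpa using hs))
              (fun ch hch => hd ch (List.mem_cons_of_mem _ hch)) hq'
          exact List.cons_prefix_cons.mpr ⟨rfl, this⟩

-- ---- scanL: equations and basic facts ----

theorem scanL_nil (L : List (List Char × List Char)) : scanL L [] = [] := by simp [scanL]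

theorem scanL_cons_some {L : List (List Char × List Char)} {c : Char} {rest : List Char}
    {pc : List Char × List Char} (h : L.find? (pcMatch (c :: rest)) = some pc) :
    scanL L (c :: rest) = pc.2 ++ scanL L (rest.drop (pc.1.length - 1)) := by
  rw [scanL, h]

theorem scanL_cons_none {L : List (List Char × List Char)} {c : Char} {rest : List Char}
    (h : L.find? (pcMatch (c :: rest)) = none) :
    scanL L (c :: rest) = c :: scanL L rest := by
  rw [scanL, h]

theorem pcMatch_iff {t : List Char} {pc : List Char × List Char} :
    pcMatch t pc = true ↔ pc.1 ≠ [] ∧ pc.1 <+: t := by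
  simp [pcMatch, List.isPrefixOf_iff_prefix]

theorem scanL_append_inert {u : List Char} {L : List (List Char × List Char)}
    (hh : ∀ ch ∈ u, ∀ pc ∈ L, pc.1.head? ≠ some ch) :
    ∀ x, scanL L (u ++ x) = u ++ scanL L x := by
  induction u with
  | nil => simp
  | cons d u' ih =>
    intro x
    have hnone : L.find? (pcMatch (d :: (u' ++ x))) = none := by
      rw [List.find?_eq_none]
      intro pc hpc hm
      rcases pcMatch_iff.mp hm with ⟨hne, hpre⟩
      cases hp : pc.1 with
      | nil => exact hne hp
      | cons e tl =>
        rw [hp] at hpre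
        rcases List.cons_prefix_cons.mp hpre with ⟨rfl, -⟩
        exact hh _ List.mem_cons_self pc hpc (by simp [hp])
    have ih' := ih (fun ch hch pc hpc => hh ch (List.mem_cons_of_mem _ hch) pc hpc)
    rw [List.cons_append, scanL_cons_none hnone, ih' x]
    simp

theorem find?_pcMatch_eq {t : List Char} {L : List (List Char × List Char)}
    (hpw : L.Pairwise npre) {pc₀ : List Char × List Char}
    (h₀ : pc₀ ∈ L) (hm : pcMatch t pc₀ = true) :
    L.find? (pcMatch t) = some pc₀ := by
  induction L with
  | nil => cases h₀
  | cons a L' ih =>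
    rcases List.mem_cons.mp h₀ with rfl | hmem
    · exact List.find?_cons_of_pos hm
    · have hna : ¬ pcMatch t a = true := by
        intro hat
        rcases pcMatch_iff.mp hat with ⟨-, hat2⟩
        rcases pcMatch_iff.mp hm with ⟨-, hm2⟩
        have hnp : npre a pc₀ := (List.pairwise_cons.mp hpw).1 pc₀ hmem
        rcases List.prefix_or_prefix_of_prefix hat2 hm2 with h | h
        · exact hnp.1 h
        · exact hnp.2 h
      rw [List.find?_cons_of_neg hna]
      exact ih (List.pairwise_cons.mp hpw).2 hmem

theorem pairwise_npre_of {L : List (List Char × List Char)}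
    (h1 : L.Pairwise (fun a b => pvSep a.1 b.1)) (h2 : ∀ pc ∈ L, pc.1 ≠ []) :
    L.Pairwise npre := by
  induction L with
  | nil => exact List.Pairwise.nil
  | cons a L' ih =>
    rcases List.pairwise_cons.mp h1 with ⟨hhead, htail⟩
    refine List.pairwise_cons.mpr ⟨?_, ih htail (fun pc hpc => h2 pc (List.mem_cons_of_mem _ hpc))⟩
    intro b hb
    have hs := hhead b hb
    have hblen : 0 < b.1.length := List.length_pos_iff.mpr (h2 b (List.mem_cons_of_mem _ hb))
    have := hs 0 hblen
    simpa [npre] using this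

-- the key step: scanning with (p,u) in front equals replacing p first, then scanning the rest
theorem scan_cons {p u : List Char} {L' : List (List Char × List Char)}
    (hGL : pvGL ((p, u) :: L')) :
    ∀ t, scanL ((p, u) :: L') t = scanL L' (rep p u t) := by
  obtain ⟨hne, hpw, hdisj⟩ := hGL
  have hp1 : p ≠ [] := (hne _ List.mem_cons_self).1
  have hu1 : u ≠ [] := (hne _ List.mem_cons_self).2
  have hneL' : ∀ pc ∈ L', pc.1 ≠ [] := fun pc hpc => (hne pc (List.mem_cons_of_mem _ hpc)).1
  have hpwL' : L'.Pairwise npre :=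
    pairwise_npre_of (List.pairwise_cons.mp hpw).2 hneL'
  have hsepL' : ∀ pc ∈ L', pvSep p pc.1 := (List.pairwise_cons.mp hpw).1
  have hdisjL' : ∀ pc ∈ L', ∀ ch ∈ pc.1, ch ∉ u := by
    intro pc hpc ch hch
    exact hdisj (p, u) List.mem_cons_self pc (List.mem_cons_of_mem _ hpc) ch hch
  have hh : ∀ ch ∈ u, ∀ pc ∈ L', pc.1.head? ≠ some ch := by
    intro ch hch pc hpc heq
    have hmm : ch ∈ pc.1 := by
      cases hpc1 : pc.1 with
      | nil => simp [hpc1] at heq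
      | cons e tl =>
        rw [hpc1] at heq
        have he : e = ch := by simpa using heq
        simp [he]
    exact (hdisjL' pc hpc ch hmm) hch
  have main : ∀ n t, t.length ≤ n → scanL ((p, u) :: L') t = scanL L' (rep p u t) := by
    intro n
    induction n with
    | zero =>
      intro t ht
      have : t = [] := by cases t <;> simp_all
      subst this
      simp [scanL_nil, rep_nil]
    | succ n ih =>
      intro t ht
      cases t with
      | nil => simp [scanL_nil, rep_nil]
      | cons c rest =>
        by_cases hp : p <+: (c :: rest)
        · have hpB : p.isPrefixOf (c :: rest) := List.isPrefixOf_iff_prefix.mpr hp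
          have hfind : ((p, u) :: L').find? (pcMatch (c :: rest)) = some (p, u) :=
            List.find?_cons_of_pos (pcMatch_iff.mpr ⟨hp1, hp⟩)
          rw [scanL_cons_some hfind, rep_cons_pos u hpB, scanL_append_inert hh]
          congr 1
          exact ih _ (by simp only [List.length_drop]; simp only [List.length_cons] at ht; omega)
        · cases hf : L'.find? (pcMatch (c :: rest)) with
          | some qv =>
            have hqm := List.find?_some hf
            have hqmem := List.mem_of_find?_eq_some hf
            rcases pcMatch_iff.mp hqm with ⟨hqne, hqpre⟩
            obtain ⟨w, hw⟩ := hqpre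
            have hq1 : 1 ≤ qv.1.length := by
              cases h : qv.1 with
              | nil => exact absurd h hqne
              | cons _ _ => simp
            have hwdrop : rest.drop (qv.1.length - 1) = w := by
              have : List.drop qv.1.length (c :: rest) = w := by
                rw [← hw, List.drop_left]
              obtain ⟨m, hm⟩ : ∃ m, qv.1.length = m + 1 := ⟨qv.1.length - 1, by omega⟩
              rw [hm] at this
              simpa [hm, List.drop_succ_cons] using this
            have hfind : ((p, u) :: L').find? (pcMatch (c :: rest)) = some qv := by
              rw [List.find?_cons_of_neg (by
                intro hcon
                exact hp (pcMatch_iff.mp hcon).2)]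
              exact hf
            rw [scanL_cons_some hfind, hwdrop]
            have hsep : pvSep p qv.1 := hsepL' qv hqmem
            have hrap : rep p u (c :: rest) = qv.1 ++ rep p u w := by
              rw [← hw]
              exact rep_append (fun k hk => sep_no_prefix_append hsep _ k hk)
            rw [hrap]
            have hfind2 : L'.find? (pcMatch (qv.1 ++ rep p u w)) = some qv :=
              find?_pcMatch_eq hpwL' hqmem
                (pcMatch_iff.mpr ⟨hqne, List.prefix_append _ _⟩)
            cases hqv : qv.1 with
            | nil => exact absurd hqv hqne
            | cons q0 qt =>
              have hfind2' : L'.find? (pcMatch (q0 :: (qt ++ rep p u w))) = some qv := by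
                rw [← List.cons_append, ← hqv]; exact hfind2
              rw [List.cons_append, scanL_cons_some hfind2']
              have hdrop2 : (qt ++ rep p u w).drop (qv.1.length - 1) = rep p u w := by
                have hlq : qv.1.length - 1 = qt.length := by rw [hqv]; simp
                rw [hlq, List.drop_left]
              rw [hdrop2]
              congr 1
              have hwlen : w.length ≤ n := by
                have := congrArg List.length hw
                simp only [List.length_append, List.length_cons, hqv] at this ht ⊢
                omega
              exact ih w hwlen
          | none =>
            have hfind : ((p, u) :: L').find? (pcMatch (c :: rest)) = none := by
              rw [List.find?_cons_of_neg (by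
                intro hcon
                exact hp (pcMatch_iff.mp hcon).2)]
              exact hf
            have hpB : ¬ p.isPrefixOf (c :: rest) := by
              intro hcon
              exact hp (List.isPrefixOf_iff_prefix.mp hcon)
            rw [scanL_cons_none hfind, rep_cons_neg u hpB]
            have hfind3 : L'.find? (pcMatch (c :: rep p u rest)) = none := by
              rw [List.find?_eq_none]
              intro pc hpc hm
              rcases pcMatch_iff.mp hm with ⟨hne2, hpre2⟩
              have hpre3 : pc.1 <+: rep p u (c :: rest) := by
                rw [rep_cons_neg u hpB]; exact hpre2
              have : pc.1 <+: (c :: rest) :=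
                prefix_rep hu1 (c :: rest).length _ _ le_rfl
                  (fun ch hch => hdisjL' pc hpc ch hch) hpre3
              exact (List.find?_eq_none.mp hf) pc hpc (pcMatch_iff.mpr ⟨hne2, this⟩)
            rw [scanL_cons_none hfind3]
            congr 1
            exact ih rest (by simpa using Nat.le_of_succ_le_succ (by simpa using ht))
  intro t
  exact main t.length t le_rfl

theorem pvGL_tail {a : List Char × List Char} {L : List (List Char × List Char)}
    (h : pvGL (a :: L)) : pvGL L := by
  obtain ⟨h1, h2, h3⟩ := h
  exact ⟨fun pc hpc => h1 pc (List.mem_cons_of_mem _ hpc),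
    (List.pairwise_cons.mp h2).2,
    fun pc hpc qc hqc => h3 pc (List.mem_cons_of_mem _ hpc) qc (List.mem_cons_of_mem _ hqc)⟩

theorem scanL_nil_left : ∀ t, scanL [] t = t := by
  intro t
  induction t with
  | nil => exact scanL_nil []
  | cons c rest ih => rw [scanL_cons_none (by simp), ih]

theorem fold_eq : ∀ L, pvGL L → ∀ t, L.foldl (fun s pc => rep pc.1 pc.2 s) t = scanL L t := by
  intro L
  induction L with
  | nil => intro _ t; simp [scanL_nil_left]
  | cons a L' ih =>
    intro hGL t
    rw [List.foldl_cons, ih (pvGL_tail hGL) (rep a.1 a.2 t)]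
    exact (scan_cons (by exact hGL) t).symm

-- ---- Bool facts → Prop facts ----

theorem sepB_sep {p q : List Char} (h : sepB p q = true) : pvSep p q := by
  intro k hk
  have := List.all_eq_true.mp h k (List.mem_range.mpr hk)
  simp only [Bool.and_eq_true, Bool.not_eq_true'] at this
  constructor
  · intro hcon
    rw [(List.isPrefixOf_iff_prefix (l₁ := p) (l₂ := q.drop k)).mpr hcon] at this
    exact absurd this.1 (by simp)
  · intro hcon
    rw [(List.isPrefixOf_iff_prefix (l₁ := q.drop k) (l₂ := p)).mpr hcon] at this
    exact absurd this.2 (by simp)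

theorem pairwiseSepB_pairwise : ∀ {L : List (List Char × List Char)},
    pairwiseSepB L = true → L.Pairwise (fun a b => pvSep a.1 b.1) := by
  intro L
  induction L with
  | nil => intro _; exact List.Pairwise.nil
  | cons a L' ih =>
    intro h
    rw [pairwiseSepB, Bool.and_eq_true] at h
    refine List.pairwise_cons.mpr ⟨?_, ih h.2⟩
    intro b hb
    exact sepB_sep (List.all_eq_true.mp h.1 b hb)

theorem glB_pvGL {L : List (List Char × List Char)} (h : glB L = true) : pvGL L := by
  rw [glB, Bool.and_eq_true, Bool.and_eq_true] at h
  obtain ⟨⟨h1, h2⟩, h3⟩ := h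
  refine ⟨?_, pairwiseSepB_pairwise h2, ?_⟩
  · intro pc hpc
    have := List.all_eq_true.mp h1 pc hpc
    simp only [Bool.and_eq_true, Bool.not_eq_true', List.isEmpty_eq_false_iff] at this
    exact this
  · intro pc hpc qc hqc ch hch hmem
    have := List.all_eq_true.mp (List.all_eq_true.mp (List.all_eq_true.mp h3 pc hpc) qc hqc) ch hch
    rw [Bool.not_eq_true', ← Bool.not_eq_true, List.contains_iff_mem] at this
    exact this hmem

theorem pvGL_PLlit : pvGL PLlit := glB_pvGL glB_PL

theorem npre_PLlit : PLlit.Pairwise npre :=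
  pairwise_npre_of pvGL_PLlit.2.1 (fun pc hpc => (pvGL_PLlit.1 pc hpc).1)

theorem fb_combo : ∀ e ∈ comboTbl.items, e.1.length = 2 ∧ ('\\' :: e.1, e.2) ∈ PLlit := by
  intro e he
  have := List.all_eq_true.mp comboB e he
  simp only [Bool.and_eq_true, beq_iff_eq] at this
  exact ⟨this.1, List.contains_iff_mem.mp this.2⟩

theorem fb_shape : ∀ pc ∈ PLlit,
    (pc.1.length = 3 ∧ pc.1 = '\\' :: List.take 2 (pc.1.drop 1)
      ∧ (pc.1.drop 1, pc.2) ∈ comboTbl.items)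
  ∨ (pc.1.length = 5 ∧ pc.1 = '{' :: (List.take 3 (pc.1.drop 1)) ++ ['}']
      ∧ (List.take 3 (pc.1.drop 1), pc.2) ∈ PLlit) := by
  intro pc hpc
  have := List.all_eq_true.mp shapeB pc hpc
  simp only [Bool.or_eq_true, Bool.and_eq_true, beq_iff_eq] at this
  rcases this with ⟨⟨h1, h2⟩, h3⟩ | ⟨⟨h1, h2⟩, h3⟩
  · exact Or.inl ⟨h1, h2, List.contains_iff_mem.mp h3⟩
  · exact Or.inr ⟨h1, h2, List.contains_iff_mem.mp h3⟩

theorem fb_vals : ∀ pc ∈ PLlit, ∀ ch ∈ pc.2, ¬(ch = '{' ∨ ch = '}') := by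
  intro pc hpc ch hch
  have h := factsB
  simp only [Bool.and_eq_true] at h
  have := List.all_eq_true.mp (List.all_eq_true.mp h.1 pc hpc) ch hch
  simp only [Bool.not_eq_true', Bool.or_eq_false_iff, beq_eq_false_iff_ne] at this
  rintro (rfl | rfl)
  · exact this.1 rfl
  · exact this.2 rfl

theorem fb_latex : ∀ lu ∈ latexMap, lu.1.toList ≠ [] ∧ stripA lu.1.toList ≠ [] := by
  intro lu hlu
  have h := factsB
  simp only [Bool.and_eq_true] at h
  have := List.all_eq_true.mp h.2 lu hlu
  simp only [Bool.and_eq_true, Bool.not_eq_true', List.isEmpty_eq_false_iff] at this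
  exact this

-- heads of PLlit patterns are only '\' or '{'
theorem fb_head : ∀ pc ∈ PLlit, pc.1.head? = some '\\' ∨ pc.1.head? = some '{' := by
  intro pc hpc
  rcases fb_shape pc hpc with ⟨-, h2, -⟩ | ⟨-, h2, -⟩
  · left; rw [h2]; rfl
  · right; rw [h2]; rfl

-- ---- B side: scanB computes braceFilter ∘ scanL PLlit ----

theorem scanB_nil : scanB [] = [] := by simp [scanB]

theorem scanB_cons_hit {c : Char} {rest u : List Char}
    (h1 : c = '\\' ∧ 2 ≤ rest.length)
    (h2 : PySem.Dict.get? comboTbl (List.take 2 rest) = some u) :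
    scanB (c :: rest) = u ++ scanB (List.drop 2 rest) := by
  rw [scanB, if_pos h1, h2]

theorem scanB_cons_miss {c : Char} {rest : List Char}
    (h : (if c = '\\' ∧ 2 ≤ rest.length then PySem.Dict.get? comboTbl (List.take 2 rest) else none) = none) :
    scanB (c :: rest) = if c ≠ '{' ∧ c ≠ '}' then c :: scanB rest else scanB rest := by
  rw [scanB, h]

theorem braceFilter_append_vals {u x : List Char}
    (hu : ∀ ch ∈ u, ¬(ch = '{' ∨ ch = '}')) :
    braceFilter (u ++ x) = u ++ braceFilter x := by
  show List.filter _ _ = _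
  rw [List.filter_append]
  congr 1
  rw [List.filter_eq_self]
  intro a ha
  have hv := hu a ha
  have h1 : a ≠ '{' := fun h => hv (Or.inl h)
  have h2 : a ≠ '}' := fun h => hv (Or.inr h)
  simp [h1, h2]

theorem scanB_eq : ∀ t, scanB t = braceFilter (scanL PLlit t) := by
  have main : ∀ n t, t.length ≤ n → scanB t = braceFilter (scanL PLlit t) := by
    intro n
    induction n with
    | zero =>
      intro t ht
      have : t = [] := by cases t <;> simp_all
      subst this
      simp [scanB_nil, scanL_nil, braceFilter]
    | succ n ih =>
      intro t ht
      cases t with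
      | nil => simp [scanB_nil, scanL_nil, braceFilter]
      | cons c rest =>
        by_cases hg : c = '\\' ∧ 2 ≤ rest.length
        · obtain ⟨rfl, h2⟩ := hg
          obtain ⟨a, b, w, rfl⟩ : ∃ a b w, rest = a :: b :: w := by
            cases rest with
            | nil => simp at h2
            | cons a r1 =>
              cases r1 with
              | nil => simp at h2
              | cons b w => exact ⟨a, b, w, rfl⟩
          have htake : List.take 2 (a :: b :: w) = [a, b] := by simp
          cases hf : List.find? (fun p => p.1 == [a, b]) comboTbl.items with
          | some e =>
            have hek : e.1 = [a, b] := by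
              have := List.find?_some hf
              simpa using this
            have hemem := List.mem_of_find?_eq_some hf
            obtain ⟨-, hPL⟩ := fb_combo e hemem
            rw [hek] at hPL
            have hget : PySem.Dict.get? comboTbl (List.take 2 (a :: b :: w)) = some e.2 := by
              unfold PySem.Dict.get?
              rw [htake, hf]; rfl
            rw [scanB_cons_hit ⟨rfl, h2⟩ hget]
            have hfind : PLlit.find? (pcMatch ('\\' :: a :: b :: w)) = some (['\\', a, b], e.2) :=
              find?_pcMatch_eq npre_PLlit hPL
                (pcMatch_iff.mpr ⟨by simp, ⟨w, rfl⟩⟩)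
            rw [scanL_cons_some hfind]
            have hdrop : (a :: b :: w).drop ((['\\', a, b] : List Char).length - 1) = w := by simp
            rw [hdrop]
            rw [braceFilter_append_vals (fb_vals _ hPL)]
            have hdw : List.drop 2 (a :: b :: w) = w := by simp
            rw [hdw]
            congr 1
            exact ih w (by simp only [List.length_cons] at ht; omega)
          | none =>
            have hget : (if ('\\' : Char) = '\\' ∧ 2 ≤ (a :: b :: w).length then
                PySem.Dict.get? comboTbl (List.take 2 (a :: b :: w)) else none) = none := by
              rw [if_pos ⟨rfl, h2⟩]
              unfold PySem.Dict.get?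
              rw [htake, hf]; rfl
            rw [scanB_cons_miss hget, if_pos (by constructor <;> decide)]
            have hfind : PLlit.find? (pcMatch ('\\' :: a :: b :: w)) = none := by
              rw [List.find?_eq_none]
              intro pc hpc hm
              rcases pcMatch_iff.mp hm with ⟨hne2, hpre2⟩
              rcases fb_shape pc hpc with ⟨h3, hsh, hmem⟩ | ⟨h5, hsh, -⟩
              · -- bare escape: its key must be [a,b], contradicting hf
                have hk2 : (pc.1.drop 1).length = 2 := by
                  simp only [List.length_drop, h3]
                have hpre3 : pc.1.drop 1 <+: a :: b :: w := by
                  rw [hsh] at hpre2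
                  have := List.cons_prefix_cons.mp hpre2
                  rw [hsh]
                  simpa using this.2
                have hkeq : pc.1.drop 1 = [a, b] := by
                  have := List.prefix_iff_eq_take.mp hpre3
                  rw [hk2] at this
                  simpa using this
                have := List.find?_eq_none.mp hf (pc.1.drop 1, pc.2) hmem
                rw [hkeq] at this
                simp at this
              · -- braced escape cannot start with '\'
                rw [hsh] at hpre2
                rcases List.cons_prefix_cons.mp hpre2 with ⟨heq, -⟩
                exact absurd heq (by decide)
            rw [scanL_cons_none hfind]
            have hrest : scanB (a :: b :: w) = braceFilter (scanL PLlit (a :: b :: w)) :=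
              ih _ (by simp only [List.length_cons] at ht ⊢; omega)
            rw [hrest]
            show _ = List.filter _ _
            rw [List.filter_cons, if_pos (by decide)]
            rfl
        · -- guard false: scanB copies or drops c
          have hget : (if c = '\\' ∧ 2 ≤ rest.length then
              PySem.Dict.get? comboTbl (List.take 2 rest) else none) = none := by
            rw [if_neg hg]
          rw [scanB_cons_miss hget]
          have hnomatch3 : ∀ pc ∈ PLlit, pc.1.length = 3 → ¬ pc.1 <+: c :: rest := by
            intro pc hpc h3 hpre
            rcases fb_shape pc hpc with ⟨-, hsh, -⟩ | ⟨h5, -, -⟩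
            · rw [hsh] at hpre
              rcases List.cons_prefix_cons.mp hpre with ⟨heq, hpre'⟩
              have hk2 : (List.take 2 (pc.1.drop 1)).length = 2 := by
                simp only [List.length_take, List.length_drop, h3]; omega
              have hlen : 2 ≤ rest.length := by
                have := hpre'.length_le
                omega
              exact hg ⟨heq.symm, hlen⟩
            · omega
          by_cases hcb : c = '{'
          · subst hcb
            cases hf : PLlit.find? (pcMatch ('{' :: rest)) with
            | some pc =>
              have hm := List.find?_some hf
              have hmem := List.mem_of_find?_eq_some hf
              rcases pcMatch_iff.mp hm with ⟨hne2, hpre2⟩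
              rcases fb_shape pc hmem with ⟨h3, -, -⟩ | ⟨h5, hsh, hmid⟩
              · exact absurd hpre2 (hnomatch3 pc hmem h3)
              · -- braced pattern: pc.1 = '{' :: m ++ ['}'], (m, pc.2) ∈ PLlit
                obtain ⟨m, hsh, hmid, hm3⟩ :
                    ∃ m, pc.1 = '{' :: m ++ ['}'] ∧ (m, pc.2) ∈ PLlit ∧ m.length = 3 :=
                  ⟨List.take 3 (pc.1.drop 1), hsh, hmid, by
                    simp only [List.length_take, List.length_drop, h5]; omega⟩
                have hpre3 : m ++ ['}'] <+: rest := by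
                  rw [hsh] at hpre2
                  exact (List.cons_prefix_cons.mp hpre2).2
                obtain ⟨w, hw⟩ := hpre3
                -- scanL on the full string consumes 5 chars
                rw [scanL_cons_some hf]
                have hdropfull : rest.drop (pc.1.length - 1) = w := by
                  rw [h5, ← hw]
                  have : (4 : Nat) = (m ++ ['}']).length := by
                    simp [hm3]
                  simp only [Nat.reduceSub]  -- 5-1 = 4
                  rw [this, List.drop_left]
                rw [hdropfull]
                -- scanB drops '{' and recurses on rest
                rw [if_neg (by simp)]
                rw [ih rest (by simp only [List.length_cons] at ht; omega)]
                -- scanL on rest matches the bare core m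
                obtain ⟨m0, m1, m2, hmlit⟩ : ∃ m0 m1 m2, m = [m0, m1, m2] := by
                  cases m with
                  | nil => simp at hm3
                  | cons m0 r =>
                    cases r with
                    | nil => simp at hm3
                    | cons m1 r2 =>
                      cases r2 with
                      | nil => simp at hm3
                      | cons m2 r3 =>
                        cases r3 with
                        | nil => exact ⟨m0, m1, m2, rfl⟩
                        | cons _ _ => simp at hm3
                have hrest_eq : rest = m0 :: m1 :: m2 :: '}' :: w := by
                  rw [← hw, hmlit]; rfl
                have hfind2 : PLlit.find? (pcMatch rest) = some (m, pc.2) := by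
                  refine find?_pcMatch_eq npre_PLlit hmid (pcMatch_iff.mpr ⟨?_, ?_⟩)
                  · show m ≠ []; rw [hmlit]; simp
                  · show m <+: rest
                    rw [← hw]
                    exact (List.prefix_append m ['}']).trans (List.prefix_append _ w)
                rw [hrest_eq] at hfind2
                rw [hrest_eq, scanL_cons_some hfind2]
                have hdrop2 : (m1 :: m2 :: '}' :: w).drop (((m, pc.2).1 : List Char).length - 1) = '}' :: w := by
                  rw [hm3]  -- length 3
                  rfl
                rw [hdrop2]
                -- scanL on '}'::w emits '}' then continues with w
                have hfind3 : PLlit.find? (pcMatch ('}' :: w)) = none := by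
                  rw [List.find?_eq_none]
                  intro qc hqc hmq
                  rcases pcMatch_iff.mp hmq with ⟨hq1, hq2⟩
                  have hh := fb_head qc hqc
                  cases hqc1 : qc.1 with
                  | nil => exact hq1 hqc1
                  | cons q0 qt =>
                    rw [hqc1] at hq2 hh
                    rcases List.cons_prefix_cons.mp hq2 with ⟨heq, -⟩
                    subst heq
                    rcases hh with hh | hh <;> simp at hh
                rw [scanL_cons_none hfind3]
                rw [braceFilter_append_vals (fb_vals _ hmem), braceFilter_append_vals (fb_vals _ hmem)]
                simp [braceFilter]
            | none =>
              rw [scanL_cons_none hf, if_neg (by simp)]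
              rw [ih rest (by simp only [List.length_cons] at ht; omega)]
              show _ = List.filter _ _
              rw [List.filter_cons, if_neg (by decide)]
              rfl
          · -- c ≠ '{': no pattern can match (heads are '\' with 2 lookahead, or '{')
            have hfind : PLlit.find? (pcMatch (c :: rest)) = none := by
              rw [List.find?_eq_none]
              intro pc hpc hm
              rcases pcMatch_iff.mp hm with ⟨hne2, hpre2⟩
              rcases fb_shape pc hpc with ⟨h3, -, -⟩ | ⟨-, hsh, -⟩
              · exact hnomatch3 pc hpc h3 hpre2
              · rw [hsh] at hpre2
                rcases List.cons_prefix_cons.mp hpre2 with ⟨heq, -⟩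
                exact hcb heq.symm
            rw [scanL_cons_none hfind]
            have hrest := ih rest (by simp only [List.length_cons] at ht; omega)
            by_cases hcr : c = '}'
            · subst hcr
              rw [if_neg (by simp), hrest]
              show _ = List.filter _ _
              rw [List.filter_cons, if_neg (by decide)]
              rfl
            · rw [if_pos ⟨hcb, hcr⟩, hrest]
              show _ = List.filter _ _
              rw [List.filter_cons, if_pos (by simp [hcb, hcr])]
              rfl
  intro t
  exact main t.length t le_rfl

-- ---- A side: the Str-level fold equals the char-level PL fold ----

theorem tl_lbrace : "{".toList = ['{'] := by decide
theorem tl_rbrace : "}".toList = ['}'] := by decide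
theorem tl_empty : "".toList = [] := by decide
theorem tl_space : " ".toList = [' '] := by decide

set_option maxHeartbeats 1600000 in
theorem foldA_chars : ∀ (M : List (String × String)),
    (∀ lu ∈ M, lu.1.toList ≠ [] ∧ stripA lu.1.toList ≠ []) → ∀ s : String,
    (M.foldl (fun t lu =>
      PySem.Str.replace (PySem.Str.replace t lu.1 lu.2)
        (PySem.Str.replace (PySem.Str.replace lu.1 "{" "") "}" "") lu.2) s).toList
    = (M.flatMap (fun lu => [(lu.1.toList, lu.2.toList), (stripA lu.1.toList, lu.2.toList)])).foldl
        (fun s pc => rep pc.1 pc.2 s) s.toList := by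
  intro M
  induction M with
  | nil => intro _ s; simp
  | cons lu M' ih =>
    intro hne s
    have hlu := hne lu List.mem_cons_self
    rw [List.foldl_cons, List.flatMap_cons, List.foldl_append]
    refine (ih (fun x hx => hne x (List.mem_cons_of_mem _ hx)) _).trans ?_
    have hstep : (PySem.Str.replace (PySem.Str.replace s lu.1 lu.2)
        (PySem.Str.replace (PySem.Str.replace lu.1 "{" "") "}" "") lu.2).toList
        = rep (stripA lu.1.toList) lu.2.toList (rep lu.1.toList lu.2.toList s.toList) := by
      simp only [PySem.Str.replace, String.toList_ofList, tl_lbrace, tl_rbrace, tl_empty]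
      rw [replace_eq_rep lu.2.toList hlu.1 s.toList]
      have hstrip : PySem.Chars.replace (PySem.Chars.replace lu.1.toList ['{'] []) ['}'] []
          = stripA lu.1.toList := rfl
      rw [hstrip]
      exact replace_eq_rep lu.2.toList hlu.2 _
    simp only [List.foldl_cons, List.foldl_nil]
    rw [hstep]

-- ---- whitespace: " ".join(x.split()) never needs a further strip ----

theorem split₀_good : ∀ l, ∀ w ∈ PySem.Chars.split₀ l,
    w ≠ [] ∧ ∀ c ∈ w, PySem.Chars.isspace c = false := by
  have go_good : ∀ (cs cur : List Char) (acc : List (List Char)),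
      (∀ c ∈ cur, PySem.Chars.isspace c = false) →
      (∀ w ∈ acc, w ≠ [] ∧ ∀ c ∈ w, PySem.Chars.isspace c = false) →
      ∀ w ∈ PySem.Chars.split₀.go cs cur acc,
        w ≠ [] ∧ ∀ c ∈ w, PySem.Chars.isspace c = false := by
    intro cs
    induction cs with
    | nil =>
      intro cur acc hcur hacc w hw
      rw [PySem.Chars.split₀.go] at hw
      by_cases hce : cur.isEmpty
      · rw [if_pos hce] at hw
        exact hacc w (List.mem_reverse.mp hw)
      · rw [if_neg hce] at hw
        rcases List.mem_cons.mp (List.mem_reverse.mp hw) with rfl | h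
        · refine ⟨by simpa [List.isEmpty_iff] using hce, ?_⟩
          intro c hc
          exact hcur c (List.mem_reverse.mp hc)
        · exact hacc w h
    | cons c rest ih =>
      intro cur acc hcur hacc w hw
      rw [PySem.Chars.split₀.go] at hw
      by_cases hsp : PySem.Chars.isspace c
      · rw [if_pos hsp] at hw
        by_cases hce : cur.isEmpty
        · rw [if_pos hce] at hw
          exact ih [] acc (by simp) hacc w hw
        · rw [if_neg hce] at hw
          refine ih [] (cur.reverse :: acc) (by simp) ?_ w hw
          intro v hv
          rcases List.mem_cons.mp hv with rfl | h
          · refine ⟨by simpa [List.isEmpty_iff] using hce, ?_⟩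
            intro d hd
            exact hcur d (List.mem_reverse.mp hd)
          · exact hacc v h
      · rw [if_neg hsp] at hw
        refine ih (c :: cur) acc ?_ hacc w hw
        intro d hd
        rcases List.mem_cons.mp hd with rfl | h
        · simpa using hsp
        · exact hcur d h
  intro l w hw
  exact go_good l [] [] (by simp) (by simp) w hw

theorem join_ne_nil : ∀ (ps : List (List Char)), ps ≠ [] → (∀ w ∈ ps, w ≠ []) →
    PySem.Chars.join [' '] ps ≠ [] := by
  intro ps hps hne
  cases ps with
  | nil => exact absurd rfl hps
  | cons w r =>
    cases r with
    | nil =>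
      rw [PySem.Chars.join_singleton]
      exact hne w List.mem_cons_self
    | cons w' r' =>
      rw [PySem.Chars.join_cons_cons]
      have : w ≠ [] := hne w List.mem_cons_self
      simp [this]

theorem join_head_nonspace : ∀ (ps : List (List Char)),
    (∀ w ∈ ps, w ≠ [] ∧ ∀ c ∈ w, PySem.Chars.isspace c = false) →
    ∀ c, (PySem.Chars.join [' '] ps).head? = some c → PySem.Chars.isspace c = false := by
  intro ps hps c hc
  cases ps with
  | nil => simp [PySem.Chars.join, List.intercalate] at hc
  | cons w r =>
    have hw := hps w List.mem_cons_self
    have hhead : (PySem.Chars.join [' '] (w :: r)).head? = w.head? := by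
      cases r with
      | nil => rw [PySem.Chars.join_singleton]
      | cons w' r' =>
        rw [PySem.Chars.join_cons_cons, List.append_assoc, List.head?_append]
        cases hwc : w with
        | nil => exact absurd hwc hw.1
        | cons a t => simp
    rw [hhead] at hc
    exact hw.2 c (by
      cases hwc : w with
      | nil => rw [hwc] at hc; simp at hc
      | cons a t =>
        rw [hwc] at hc
        simp at hc
        simp [hc])

theorem join_last_nonspace : ∀ (ps : List (List Char)),
    (∀ w ∈ ps, w ≠ [] ∧ ∀ c ∈ w, PySem.Chars.isspace c = false) →
    ∀ c, (PySem.Chars.join [' '] ps).getLast? = some c → PySem.Chars.isspace c = false := by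
  intro ps
  induction ps with
  | nil => intro _ c hc; simp [PySem.Chars.join, List.intercalate] at hc
  | cons w r ih =>
    intro hps c hc
    cases r with
    | nil =>
      rw [PySem.Chars.join_singleton] at hc
      have hw := hps w List.mem_cons_self
      exact hw.2 c (List.mem_of_getLast? hc)
    | cons w' r' =>
      rw [PySem.Chars.join_cons_cons, List.getLast?_append] at hc
      have hr : ∀ v ∈ w' :: r', v ≠ [] ∧ ∀ d ∈ v, PySem.Chars.isspace d = false :=
        fun v hv => hps v (List.mem_cons_of_mem _ hv)
      have hJ : PySem.Chars.join [' '] (w' :: r') ≠ [] :=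
        join_ne_nil _ (by simp) (fun v hv => (hr v hv).1)
      obtain ⟨j, hj⟩ := Option.ne_none_iff_exists'.mp
        (fun hnone => hJ (List.getLast?_eq_none_iff.mp hnone))
      rw [hj, Option.some_or] at hc
      have hjc : j = c := Option.some.inj hc
      subst hjc
      exact ih hr _ hj

theorem lstrip_eq_self {s : List Char}
    (h : ∀ c, s.head? = some c → PySem.Chars.isspace c = false) :
    PySem.Chars.lstrip s = s := by
  unfold PySem.Chars.lstrip
  cases s with
  | nil => simp
  | cons c t =>
    rw [List.dropWhile_cons, if_neg (by simp [h c rfl])]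

theorem rstrip_eq_self {s : List Char}
    (h : ∀ c, s.getLast? = some c → PySem.Chars.isspace c = false) :
    PySem.Chars.rstrip s = s := by
  unfold PySem.Chars.rstrip
  cases hr : s.reverse with
  | nil =>
    have : s = [] := by simpa using congrArg List.reverse hr
    simp [this]
  | cons c r =>
    have hc : s.getLast? = some c := by
      rw [← List.head?_reverse, hr]; rfl
    rw [List.dropWhile_cons, if_neg (by simp [h c hc])]
    rw [← hr, List.reverse_reverse]

theorem strip_join_split (l : List Char) :
    PySem.Chars.strip (PySem.Chars.join [' '] (PySem.Chars.split₀ l))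
      = PySem.Chars.join [' '] (PySem.Chars.split₀ l) := by
  unfold PySem.Chars.strip
  rw [lstrip_eq_self (join_head_nonspace _ (split₀_good l))]
  exact rstrip_eq_self (join_last_nonspace _ (split₀_good l))

theorem strip_join_split_str (z : String) :
    PySem.Str.strip (PySem.Str.join " " (PySem.Str.split₀ z))
      = PySem.Str.join " " (PySem.Str.split₀ z) := by
  unfold PySem.Str.strip PySem.Str.join PySem.Str.split₀
  rw [String.toList_ofList]
  refine congrArg String.ofList ?_
  have hmap : (List.map String.toList (List.map String.ofList
      (PySem.Chars.split₀ z.toList))) = PySem.Chars.split₀ z.toList := by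
    rw [List.map_map]
    simp [Function.comp_def, String.toList_ofList]
  rw [hmap, tl_space]
  exact strip_join_split z.toList

-- ---- final assembly ----

theorem braceFilter_eq (X : List Char) :
    ((X.filter (fun c => !(c == '{'))).filter (fun c => !(c == '}'))) = braceFilter X := by
  rw [List.filter_filter]
  unfold braceFilter
  apply List.filter_congr
  intro a _
  rw [Bool.not_or, Bool.and_comm]

theorem chars_A_eq_B (text : String) :
    (PySem.Str.replace (PySem.Str.replace
        (latexMap.foldl (fun t lu =>
          PySem.Str.replace (PySem.Str.replace t lu.1 lu.2)
            (PySem.Str.replace (PySem.Str.replace lu.1 "{" "") "}" "") lu.2) text)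
        "{" "") "}" "").toList = scanB text.toList := by
  have h1 : ∀ (G : String), (PySem.Str.replace (PySem.Str.replace G "{" "") "}" "").toList
      = rep ['}'] [] (rep ['{'] [] G.toList) := by
    intro G
    simp only [PySem.Str.replace, String.toList_ofList, tl_lbrace, tl_rbrace, tl_empty]
    rw [replace_eq_rep [] (by simp) _, replace_eq_rep [] (by simp) _]
  rw [h1, foldA_chars latexMap fb_latex text]
  have hPL : (latexMap.flatMap (fun lu =>
      [(lu.1.toList, lu.2.toList), (stripA lu.1.toList, lu.2.toList)])) = PLlit := PL_eq
  rw [hPL, fold_eq PLlit pvGL_PLlit]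
  rw [rep_single_filter, rep_single_filter, braceFilter_eq]
  exact (scanB_eq text.toList).symm

-- ===== VERDICT (by name: the statement is the Claim_ definition above) =====
set_option maxRecDepth 4000 in
theorem clean_bibtex_string_spec : Claim_equal_clean_bibtex_string := by
  unfold Claim_equal_clean_bibtex_string
  intro text _
  unfold Spec_clean_bibtex_string clean_bibtex_string clean_bibtex_string_alt
  by_cases h : text = ""
  · rw [if_pos h, if_pos h]
  · rw [if_neg h, if_neg h]
    have hchars := chars_A_eq_B text
    set tA := PySem.Str.replace (PySem.Str.replace
        (latexMap.foldl (fun t lu =>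
          PySem.Str.replace (PySem.Str.replace t lu.1 lu.2)
            (PySem.Str.replace (PySem.Str.replace lu.1 "{" "") "}" "") lu.2) text)
        "{" "") "}" ""
    have hsplit : PySem.Str.split₀ tA
        = PySem.Str.split₀ (String.ofList (scanB text.toList)) := by
      unfold PySem.Str.split₀
      rw [hchars, String.toList_ofList]
    rw [hsplit]
    exact strip_join_split_str (String.ofList (scanB text.toList))
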